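-- pv_equiv track=rewrite | github.com/Ben5/Sniffer | sniffer.py | GetFunctionCalls
-- ===== SOURCE A (Python) =====
-- def GetFunctionCalls(functionLines):
--     functions = {'functions':{}, 'crazy':[] }
--
--     # functions we aren't interested in:
--     ignoreFunctions = ['if', 'for', 'foreach', 'array', 'trigger_error', 'trigger_warning']
--
--     for line in functionLines:
--         for chunk in line.split('(')[:-1]:
--             if len(chunk.split()) > 0:
--                 word = chunk.split()[-1]
--                 if word not in ignoreFunctions:
--                     if word not in functions['functions']:
--                         functions['functions'][word] = 0
--                     functions['functions'][word] += 1
--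
--     # todo: write CheckForCrazyInFunctionCalls!
--     # functions['crazy'] = CheckForCrazyInFunctionCalls(functions['functions'])
--
--     return functions
-- ===== SOURCE B (Python) =====
-- def GetFunctionCalls(functionLines):
--     ignore = {'if', 'for', 'foreach', 'array', 'trigger_error', 'trigger_warning'}
--     counts = {}
--     for line in functionLines:
--         tok = ''   # current run of non-space, non-'(' characters
--         last = ''  # last completed run since the previous '('
--         for c in line:
--             if c == '(':
--                 word = tok if tok else last
--                 if word and word not in ignore:
--                     counts[word] = counts.get(word, 0) + 1
--                 tok = ''
--                 last = ''
--             elif c.isspace():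
--                 if tok:
--                     last = tok
--                     tok = ''
--             else:
--                 tok += c
--     return {'functions': counts, 'crazy': []}
-- ===== Notes on version B (the rewrite author's own statement) =====
-- stated objective: alternative
-- what changed: B replaces A's per-line double splitting (split on '(' , then whitespace-split each chunk twice to take its last word) by a single left-to-right character scan per line that maintains the current non-space run and the last completed run, emitting a count at each '('.
import Mathlib
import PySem

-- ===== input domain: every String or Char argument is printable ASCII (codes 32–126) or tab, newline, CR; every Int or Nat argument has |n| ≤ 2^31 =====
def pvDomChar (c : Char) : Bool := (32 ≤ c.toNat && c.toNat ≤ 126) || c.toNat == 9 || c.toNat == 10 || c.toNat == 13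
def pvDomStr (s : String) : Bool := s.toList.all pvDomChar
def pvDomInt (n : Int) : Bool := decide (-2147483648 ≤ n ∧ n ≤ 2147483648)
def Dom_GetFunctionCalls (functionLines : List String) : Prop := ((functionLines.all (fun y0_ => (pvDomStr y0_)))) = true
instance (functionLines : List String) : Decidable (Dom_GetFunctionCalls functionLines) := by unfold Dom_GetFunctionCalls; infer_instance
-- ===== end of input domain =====

-- B replaces A's split-on-'(' + whitespace-split-per-chunk strategy by a single character scan
-- per line (objective: alternative — a genuinely different traversal, same cost).

-- ===== PORT A =====
def pvIgnoreA : List String := ["if", "for", "foreach", "array", "trigger_error", "trigger_warning"]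

-- body of A's inner loop: one chunk of line.split('(')[:-1]
def pvChunkStepA (d : PySem.Dict String Int) (chunk : String) : PySem.Dict String Int :=
  if 0 < (PySem.Str.split₀ chunk).length then
    let word := PySem.List.pyGetD (PySem.Str.split₀ chunk) (-1) ""
    if ¬ (word ∈ pvIgnoreA) then
      let d1 := if ¬ ((PySem.Dict.contains d word) = true) then d.insert word 0 else d
      d1.modify word 0 (· + 1)
    else d
  else d

def pvLineStepA (d : PySem.Dict String Int) (line : String) : PySem.Dict String Int :=
  (PySem.List.slice ((PySem.Str.split? line "(").getD []) none (some (-1))).foldl pvChunkStepA d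

def GetFunctionCalls (functionLines : List String) : List (String × List (String × Int)) :=
  let funcs := functionLines.foldl pvLineStepA PySem.Dict.empty
  [("functions", funcs.items), ("crazy", [])]

-- ===== PORT B =====
def pvIgnoreB : PySem.Set String :=
  PySem.Set.ofList ["if", "for", "foreach", "array", "trigger_error", "trigger_warning"]

-- body of B's character loop; state = ((tok, last), counts)
def pvCharStepB (st : (List Char × List Char) × PySem.Dict String Int) (c : Char) :
    (List Char × List Char) × PySem.Dict String Int :=
  let tok := st.1.1
  let last := st.1.2
  let d := st.2
  if c = '(' then
    let word := if tok ≠ [] then tok else last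
    let d' :=
      if word ≠ [] ∧ ¬ (PySem.Set.contains pvIgnoreB (String.ofList word) = true) then
        d.insert (String.ofList word) (d.getD (String.ofList word) 0 + 1)
      else d
    (([], []), d')
  else if PySem.Chars.isspace c then
    (if tok ≠ [] then (([], tok), d) else ((tok, last), d))
  else ((tok ++ [c], last), d)

def pvLineStepB (d : PySem.Dict String Int) (line : String) : PySem.Dict String Int :=
  (line.toList.foldl pvCharStepB (([], []), d)).2

def GetFunctionCalls_alt (functionLines : List String) : List (String × List (String × Int)) :=
  let counts := functionLines.foldl pvLineStepB PySem.Dict.empty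
  [("functions", counts.items), ("crazy", [])]

-- ===== PRECONDITION & SPEC =====
def Spec_GetFunctionCalls (functionLines : List String) (out : List (String × List (String × Int))) : Prop := out = GetFunctionCalls_alt functionLines
instance (functionLines : List String) (out : List (String × List (String × Int))) : Decidable (Spec_GetFunctionCalls functionLines out) := by unfold Spec_GetFunctionCalls; infer_instance

-- ===== CLAIM (what is proved, stated in full; the proofs are below) =====
def Claim_equal_GetFunctionCalls : Prop := ∀ (functionLines : List String), Dom_GetFunctionCalls functionLines → Spec_GetFunctionCalls functionLines (GetFunctionCalls functionLines)

-- ===== LEMMAS AND PROOFS =====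

-- reference model of str.split() (whitespace split); cur = word being built
def myWords (cur : List Char) : List Char → List (List Char)
  | [] => if cur = [] then [] else [cur]
  | c :: rest =>
      if PySem.Chars.isspace c then
        if cur = [] then myWords [] rest else cur :: myWords [] rest
      else myWords (cur ++ [c]) rest

-- reference model of s.split('(')
def mySplit : List Char → List (List Char)
  | [] => [[]]
  | c :: rest => if c = '(' then [] :: mySplit rest else (mySplit rest).modifyHead (c :: ·)

-- the common per-word dict update
def uW (d : PySem.Dict String Int) (w : List Char) : PySem.Dict String Int :=
  if (String.ofList w) ∈ pvIgnoreA then d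
  else d.insert (String.ofList w) (d.getD (String.ofList w) 0 + 1)

-- words A counts, given the chunk-list structure of a line
def wordsA (cs : List Char) : List (List Char) :=
  ((mySplit cs).dropLast).filterMap (fun ch => (myWords [] ch).getLast?)

-- words B counts: the emitted sequence of the scan, from pending state (tok, last)
def emitB (tok last : List Char) : List Char → List (List Char)
  | [] => []
  | c :: rest =>
      if c = '(' then
        (let w := if tok ≠ [] then tok else last
         if w ≠ [] then [w] else []) ++ emitB [] [] rest
      else if PySem.Chars.isspace c then
        emitB [] (if tok ≠ [] then tok else last) rest
      else emitB (tok ++ [c]) last rest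

def goodRun (r : List Char) : Prop := ∀ c ∈ r, c ≠ '(' ∧ PySem.Chars.isspace c = false

theorem split₀_go_eq (l : List Char) : ∀ (cur : List Char) (acc : List (List Char)),
    PySem.Chars.split₀.go l cur acc = acc.reverse ++ myWords cur.reverse l := by
  induction l with
  | nil =>
      intro cur acc
      simp [PySem.Chars.split₀.go, myWords, List.isEmpty_iff]
      split <;> simp_all
  | cons c rest ih =>
      intro cur acc
      simp only [PySem.Chars.split₀.go, myWords]
      by_cases hs : PySem.Chars.isspace c = true
      · simp only [hs, if_pos]
        by_cases hc : cur = []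
        · subst hc; simp [ih]
        · simp [List.isEmpty_iff, hc, ih, List.reverse_eq_nil_iff]
      · simp only [hs]
        simp [ih]

theorem split₀_eq (cs : List Char) : PySem.Chars.split₀ cs = myWords [] cs := by
  simpa using split₀_go_eq cs [] []

theorem mySplit_ne_nil (cs : List Char) : mySplit cs ≠ [] := by
  induction cs with
  | nil => simp [mySplit]
  | cons c rest ih =>
      simp only [mySplit]
      split
      · simp
      · cases h : mySplit rest with
        | nil => exact absurd h ih
        | cons a l => simp [List.modifyHead]

theorem splitOn_go_eq (fuel : Nat) : ∀ (l cur : List Char) (acc : List (List Char)),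
    l.length ≤ fuel →
    PySem.Chars.splitOn.go ['('] fuel l cur acc
      = acc.reverse ++ (mySplit l).modifyHead (cur.reverse ++ ·) := by
  induction fuel with
  | zero =>
      intro l cur acc hl
      have : l = [] := by cases l <;> simp_all
      subst this
      simp [PySem.Chars.splitOn.go, mySplit]
  | succ fuel ih =>
      intro l cur acc hl
      cases l with
      | nil => simp [PySem.Chars.splitOn.go, mySplit]
      | cons c rest =>
          simp only [PySem.Chars.splitOn.go]
          by_cases hc : c = '('
          · subst hc
            have hpre : List.isPrefixOf ['('] ('(' :: rest) = true := by simp [List.isPrefixOf]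
            rw [if_pos hpre]
            rw [ih _ _ _ (by simpa using Nat.le_of_succ_le_succ (by simpa using hl))]
            cases h : mySplit rest with
            | nil => exact absurd h (mySplit_ne_nil rest)
            | cons a l' => simp [mySplit, h, List.modifyHead]
          · have hpre : List.isPrefixOf ['('] (c :: rest) = false := by
              simp [List.isPrefixOf]; exact fun h => absurd h.symm hc
            rw [if_neg (by simp [hpre])]
            rw [ih _ _ _ (by simpa using Nat.le_of_succ_le_succ (by simpa using hl))]
            cases h : mySplit rest with
            | nil => exact absurd h (mySplit_ne_nil rest)
            | cons a l' => simp [mySplit, h, hc, List.modifyHead]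

theorem splitOn_eq (cs : List Char) : PySem.Chars.splitOn cs ['('] = mySplit cs := by
  rw [PySem.Chars.splitOn, splitOn_go_eq _ _ _ _ (by omega)]
  cases h : mySplit cs with
  | nil => exact absurd h (mySplit_ne_nil cs)
  | cons a l => simp [List.modifyHead]

theorem mySplit_append_noPar (p : List Char) (hp : ∀ c ∈ p, c ≠ '(') (cs : List Char) :
    mySplit (p ++ cs) = (mySplit cs).modifyHead (p ++ ·) := by
  induction p with
  | nil => cases h : mySplit cs <;> simp [List.modifyHead, h]
  | cons c r ih =>
      simp only [List.cons_append, mySplit]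
      rw [if_neg (hp c (by simp))]
      rw [ih (fun x hx => hp x (by simp [hx]))]
      cases h : mySplit cs <;> simp [List.modifyHead, h]

theorem mySplit_noPar (p : List Char) (hp : ∀ c ∈ p, c ≠ '(') : mySplit p = [p] := by
  have := mySplit_append_noPar p hp []
  simpa [mySplit, List.modifyHead] using this

theorem myWords_run (r : List Char) (hr : ∀ c ∈ r, PySem.Chars.isspace c = false) :
    ∀ (cur : List Char) (rest : List Char), myWords cur (r ++ rest) = myWords (cur ++ r) rest := by
  induction r with
  | nil => simp
  | cons c r ih =>
      intro cur rest
      simp only [List.cons_append, myWords]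
      rw [if_neg (by simp [hr c (by simp)])]
      rw [ih (fun x hx => hr x (by simp [hx]))]
      simp

theorem myWords_space (c : Char) (hc : PySem.Chars.isspace c = true) (cur rest : List Char) :
    myWords cur (c :: rest) = (if cur = [] then [] else [cur]) ++ myWords [] rest := by
  simp only [myWords, hc, if_pos]
  split <;> simp

theorem myWords_pend (tok last : List Char) (ht : goodRun tok) (hl : goodRun last)
    (rest : List Char) :
    myWords [] (last ++ ' ' :: tok ++ rest)
      = (if last = [] then [] else [last]) ++ myWords tok rest := by
  have hassoc : last ++ ' ' :: tok ++ rest = last ++ (' ' :: (tok ++ rest)) := by simp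
  rw [hassoc]
  rw [myWords_run last (fun c hc => (hl c hc).2) [] _]
  rw [myWords_space ' ' (by decide)]
  rw [myWords_run tok (fun c hc => (ht c hc).2) [] rest]
  simp

theorem wordsA_space (cs : List Char) : wordsA (' ' :: cs) = wordsA cs := by
  unfold wordsA
  have h1 : mySplit (' ' :: cs) = (mySplit cs).modifyHead (' ' :: ·) := by
    simp [mySplit]
  rw [h1]
  cases h : mySplit cs with
  | nil => exact absurd h (mySplit_ne_nil cs)
  | cons a l =>
      cases l with
      | nil => simp [List.modifyHead]
      | cons b l' =>
          have hmw : myWords [] (' ' :: a) = myWords [] a := by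
            rw [myWords_space ' ' (by decide)]; simp
          simp only [List.modifyHead, List.dropLast_cons₂, List.filterMap_cons, hmw]

theorem goodRun_noWs (r : List Char) (h : goodRun r) : ∀ c ∈ r, PySem.Chars.isspace c = false :=
  fun c hc => (h c hc).2

theorem pend_noPar (tok last : List Char) (ht : goodRun tok) (hl : goodRun last) :
    ∀ c ∈ last ++ ' ' :: tok, c ≠ '(' := by
  intro c hc
  simp only [List.mem_append, List.mem_cons] at hc
  rcases hc with h | h | h
  · exact (hl c h).1
  · subst h; decide
  · exact (ht c h).1

theorem wordsA_pend_space (tok last : List Char) (ht : goodRun tok) (hl : goodRun last)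
    (c : Char) (hc : PySem.Chars.isspace c = true) (hcp : c ≠ '(') (cs : List Char) :
    wordsA (last ++ ' ' :: tok ++ c :: cs)
      = wordsA ((if tok ≠ [] then tok else last) ++ ' ' :: cs) := by
  unfold wordsA
  have e1 : last ++ ' ' :: tok ++ c :: cs = (last ++ ' ' :: tok) ++ c :: cs := by simp
  rw [e1, mySplit_append_noPar _ (pend_noPar tok last ht hl)]
  set nl := if tok ≠ [] then tok else last with hnl
  have hnlg : goodRun nl := by rw [hnl]; split <;> assumption
  have e2 : nl ++ ' ' :: cs = (nl ++ [' ']) ++ cs := by simp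
  rw [e2, mySplit_append_noPar _ (by
    intro x hx
    simp only [List.mem_append, List.mem_singleton] at hx
    rcases hx with h | h
    · exact (hnlg x h).1
    · subst h; decide)]
  have h2 : mySplit (c :: cs) = (mySplit cs).modifyHead (c :: ·) := by
    simp [mySplit, hcp]
  rw [h2]
  cases h : mySplit cs with
  | nil => exact absurd h (mySplit_ne_nil cs)
  | cons a l =>
      cases l with
      | nil => simp [List.modifyHead]
      | cons b l' =>
          have hw1 : myWords [] (last ++ ' ' :: tok ++ c :: a)
              = (if last = [] then [] else [last]) ++ ((if tok = [] then [] else [tok]) ++ myWords [] a) := by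
            rw [myWords_pend tok last ht hl]
            congr 1
            rw [myWords_space c hc]
          have hw2 : myWords [] (nl ++ [' '] ++ a) = (if nl = [] then [] else [nl]) ++ myWords [] a := by
            have e4 : nl ++ [' '] ++ a = nl ++ (' ' :: a) := by simp
            rw [e4, myWords_run nl (goodRun_noWs nl hnlg) [] _, myWords_space ' ' (by decide) ([] ++ nl) a]
            simp
          have hg : ((if last = [] then [] else [last]) ++ ((if tok = [] then [] else [tok]) ++ myWords [] a)).getLast?
              = ((if nl = [] then [] else [nl]) ++ myWords [] a).getLast? := by
            by_cases htok : tok = []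
            · simp [hnl, htok, List.getLast?_append]
            · simp only [hnl, htok, ite_not, if_false, List.getLast?_append]
              cases hW : (tok :: myWords [] a).getLast? with
              | none => simp [List.getLast?_eq_none_iff] at hW
              | some v => simp
          have e3 : last ++ ' ' :: tok ++ c :: a = (last ++ ' ' :: tok) ++ c :: a := by simp
          rw [e3] at hw1
          simp only [List.modifyHead, List.dropLast_cons₂, List.filterMap_cons, hw1, hw2, hg]

theorem emitB_eq_wordsA (cs : List Char) : ∀ (tok last : List Char),
    goodRun tok → goodRun last → emitB tok last cs = wordsA (last ++ ' ' :: tok ++ cs) := by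
  induction cs with
  | nil =>
      intro tok last ht hl
      have e : last ++ ' ' :: tok ++ ([] : List Char) = last ++ ' ' :: tok := by simp
      rw [emitB, e, wordsA, mySplit_noPar _ (pend_noPar tok last ht hl)]
      simp
  | cons c rest ih =>
      intro tok last ht hl
      by_cases hpar : c = '('
      · subst hpar
        rw [emitB, if_pos rfl]
        have e : last ++ ' ' :: tok ++ '(' :: rest = (last ++ ' ' :: tok) ++ '(' :: rest := by simp
        rw [e, wordsA, mySplit_append_noPar _ (pend_noPar tok last ht hl)]
        rw [show mySplit ('(' :: rest) = [] :: mySplit rest from by simp [mySplit]]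
        cases h : mySplit rest with
        | nil => exact absurd h (mySplit_ne_nil rest)
        | cons a l =>
            simp only [List.modifyHead, List.dropLast_cons₂, List.filterMap_cons]
            rw [ih [] [] (by intro x hx; simp at hx) (by intro x hx; simp at hx)]
            have : ([] : List Char) ++ ' ' :: ([] : List Char) ++ rest = ' ' :: rest := by simp
            rw [this, wordsA_space]
            have hpw : myWords [] (last ++ ' ' :: tok)
                = (if last = [] then [] else [last]) ++ (if tok = [] then [] else [tok]) := by
              have e2 : last ++ ' ' :: tok = last ++ ' ' :: tok ++ ([] : List Char) := by simp
              rw [e2, myWords_pend tok last ht hl []]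
              simp [myWords]
            simp only [List.append_nil]
            rw [hpw]
            unfold wordsA
            rw [h]
            by_cases htok : tok = []
            · by_cases hlast : last = [] <;> simp [htok, hlast, List.getLast?_append]
            · simp [htok, List.getLast?_append]
      · by_cases hs : PySem.Chars.isspace c = true
        · rw [emitB, if_neg hpar, if_pos hs]
          rw [ih [] _ (by intro x hx; simp at hx) (by split <;> assumption)]
          rw [wordsA_pend_space tok last ht hl c hs hpar rest]
          congr 1
          simp
        · rw [emitB, if_neg hpar, if_neg hs]
          rw [ih (tok ++ [c]) last (by
            intro x hx
            rcases List.mem_append.1 hx with h | h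
            · exact ht x h
            · simp at h; subst h; exact ⟨hpar, by simpa using hs⟩) hl]
          congr 1
          simp

theorem ignoreB_eq : pvIgnoreB = pvIgnoreA := by decide

theorem contains_eq (s : String) :
    (PySem.Set.contains pvIgnoreB s = true) ↔ s ∈ pvIgnoreA := by
  rw [ignoreB_eq]
  simp [PySem.Set.contains_iff]

-- A's two-step dict update equals B's get-insert update
theorem updA_eq_updB (d : PySem.Dict String Int) (w : String) :
    (if ¬ ((PySem.Dict.contains d w) = true) then d.insert w 0 else d).modify w 0 (· + 1)
      = d.insert w (d.getD w 0 + 1) := by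
  by_cases h : PySem.Dict.contains d w = true
  · simp [h, PySem.Dict.modify]
  · simp only [h, not_false_iff, if_pos, Bool.not_eq_true, if_true]
    rw [PySem.Dict.modify, PySem.Dict.getD_insert_self, PySem.Dict.insert_insert_self,
      PySem.Dict.getD_of_not_contains d 0 (by simpa using h)]

theorem foldB_eq (cs : List Char) : ∀ (tok last : List Char) (d : PySem.Dict String Int),
    (cs.foldl pvCharStepB ((tok, last), d)).2 = (emitB tok last cs).foldl uW d := by
  induction cs with
  | nil => intro tok last d; simp [emitB]
  | cons c rest ih =>
      intro tok last d
      by_cases hpar : c = '('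
      · subst hpar
        rw [List.foldl_cons]
        rw [show pvCharStepB ((tok, last), d) '(' = (([], []),
              (if (if tok ≠ [] then tok else last) ≠ [] ∧
                  ¬ (PySem.Set.contains pvIgnoreB (String.ofList (if tok ≠ [] then tok else last)) = true) then
                d.insert (String.ofList (if tok ≠ [] then tok else last))
                  (d.getD (String.ofList (if tok ≠ [] then tok else last)) 0 + 1)
              else d)) from rfl]
        rw [ih]
        have hemit : emitB tok last ('(' :: rest)
            = (if (if tok ≠ [] then tok else last) ≠ []
                then [if tok ≠ [] then tok else last] else []) ++ emitB [] [] rest := by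
          simp [emitB]
        rw [hemit, List.foldl_append]
        congr 1
        set w := if tok ≠ [] then tok else last with hw
        by_cases hne : w ≠ []
        · rw [if_pos hne, List.foldl_cons, List.foldl_nil, uW]
          by_cases hmem : (String.ofList w) ∈ pvIgnoreA
          · rw [if_pos hmem, if_neg (fun hcontr => hcontr.2 ((contains_eq _).mpr hmem))]
          · rw [if_neg hmem, if_pos ⟨hne, fun hc => hmem ((contains_eq _).mp hc)⟩]
        · rw [if_neg hne, List.foldl_nil, if_neg (by simp_all)]
      · by_cases hs : PySem.Chars.isspace c = true
        · rw [List.foldl_cons, emitB]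
          rw [show pvCharStepB ((tok, last), d) c
                = (if tok ≠ [] then (([], tok), d) else ((tok, last), d)) from by
            simp [pvCharStepB, hpar, hs]]
          simp only [if_neg hpar, if_pos hs]
          by_cases ht : tok ≠ []
          · rw [if_pos ht, if_pos ht, ih]
          · rw [if_neg ht, if_neg ht, ih]
            congr 1
            simp only [ne_eq, not_not] at ht
            simp [ht]
        · rw [List.foldl_cons, emitB]
          rw [show pvCharStepB ((tok, last), d) c = ((tok ++ [c], last), d) from by
            simp [pvCharStepB, hpar, hs]]
          simp only [if_neg hpar, if_neg hs]
          rw [ih]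

theorem foldA_eq (chunks : List (List Char)) : ∀ (d : PySem.Dict String Int),
    (chunks.map String.ofList).foldl pvChunkStepA d
      = (chunks.filterMap (fun ch => (myWords [] ch).getLast?)).foldl uW d := by
  induction chunks with
  | nil => intro d; simp
  | cons ch rest ih =>
      intro d
      rw [List.map_cons, List.foldl_cons, List.filterMap_cons]
      have hsplit : PySem.Str.split₀ (String.ofList ch) = (myWords [] ch).map String.ofList := by
        rw [PySem.Str.split₀]
        rw [show (String.ofList ch).toList = ch from by simp]
        rw [split₀_eq]
      cases h : (myWords [] ch).getLast? with
      | none =>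
          have : myWords [] ch = [] := by simpa [List.getLast?_eq_none_iff] using h
          rw [show pvChunkStepA d (String.ofList ch) = d from by
            simp [pvChunkStepA, hsplit, this]]
          exact ih _
      | some w =>
          have hne : myWords [] ch ≠ [] := by
            intro hnil; rw [hnil] at h; simp at h
          have hlast : (myWords [] ch).getLast hne = w := by
            have := List.getLast?_eq_some_getLast (l := myWords [] ch) hne
            rw [h] at this
            exact (Option.some_injective _ this.symm)
          rw [List.foldl_cons]
          have hstep : pvChunkStepA d (String.ofList ch) = uW d w := by
            rw [pvChunkStepA, hsplit]
            rw [if_pos (by simpa using List.length_pos_iff.2 hne)]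
            have hget : PySem.List.pyGetD ((myWords [] ch).map String.ofList) (-1) ""
                = String.ofList w := by
              rw [PySem.List.pyGetD_neg_one _ _ (by simpa using hne)]
              rw [List.getLast_map]
              rw [hlast]
            rw [hget, uW]
            by_cases hmem : (String.ofList w) ∈ pvIgnoreA
            · simp [hmem]
            · simp only [hmem, not_false_iff, if_pos, if_true]
              exact updA_eq_updB d (String.ofList w)
          rw [hstep]
          exact ih _

theorem slice_neg_one {α : Type} (xs : List α) :
    PySem.List.slice xs none (some (-1)) = xs.dropLast := by
  rw [PySem.List.slice]
  simp only [PySem.List.clampIdx]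
  norm_num
  rw [List.dropLast_eq_take]
  by_cases h : xs.length = 0
  · simp [h]
  · rw [if_neg (by simpa [List.length_eq_zero_iff] using h)]
    congr 1
    omega

theorem lineStep_eq : pvLineStepA = pvLineStepB := by
  funext d line
  rw [pvLineStepA, pvLineStepB]
  rw [foldB_eq line.toList [] [] d]
  rw [emitB_eq_wordsA line.toList [] [] (by intro x hx; simp at hx) (by intro x hx; simp at hx)]
  rw [show ([] : List Char) ++ ' ' :: ([] : List Char) ++ line.toList = ' ' :: line.toList from by simp]
  rw [wordsA_space]
  rw [show PySem.Str.split? line "(" = some ((PySem.Chars.splitOn line.toList ['(']).map String.ofList) from by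
    rw [PySem.Str.split?]
    rw [show ("(" : String).toList = ['('] from by decide]
    rw [PySem.Chars.split?]
    simp]
  rw [Option.getD_some, splitOn_eq]
  rw [slice_neg_one]
  rw [← List.map_dropLast]
  rw [foldA_eq]
  rw [wordsA]

-- ===== VERDICT (by name: the statement is the Claim_ definition above) =====
theorem GetFunctionCalls_spec : Claim_equal_GetFunctionCalls := by
  intro functionLines _
  show _ = _
  unfold GetFunctionCalls GetFunctionCalls_alt
  rw [lineStep_eq]
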